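-- pv_equiv track=rewrite | github.com/foolishzhao/leetcode | python3/0600/_0672_Bulb_Switcher_II/main.py | flipLights
-- ===== SOURCE A (Python) =====
-- def flipLights(n: int, m: int) -> int:
--     def op1(lights):
--         return [1 - v for v in lights]
--
--     def op2(lights):
--         return [v if i % 2 == 0 else (1 - v) for i, v in enumerate(lights)]
--
--     def op3(lights):
--         return [v if i % 2 == 1 else (1 - v) for i, v in enumerate(lights)]
--
--     def op4(lights):
--         return [(1 - v) if i % 3 == 0 else v for i, v in enumerate(lights)]
--
--     if not m or not n:
--         return 1
--
--     candidate = [[1] * n]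
--     for _ in range(min(m, 4)):
--         cur = list()
--         for c in candidate:
--             cur.append(op1(c))
--             cur.append(op2(c))
--             cur.append(op3(c))
--             cur.append(op4(c))
--         candidate = cur  # replace, not extend
--
--     return len({str(c) for c in candidate})
-- ===== SOURCE B (Python) =====
-- def flipLights(n: int, m: int) -> int:
--     # Closed form: the reachable configurations are determined by the first
--     # min(n, 3) bulbs, and at most 4 presses matter.
--     if n <= 0 or m <= 0:
--         return 1
--     k = min(n, 3)
--     if k == 1:
--         return 2
--     if k == 2:
--         return 3 if m == 1 else 4
--     return 4 if m == 1 else (7 if m == 2 else 8)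
-- ===== Notes on version B (the rewrite author's own statement) =====
-- stated objective: faster
-- what changed: Replaces the breadth-first enumeration of up to 4^4 length-n candidate lists (and string-set deduplication) by the closed-form case table over min(n,3) and min(m,4).
import Mathlib
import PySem

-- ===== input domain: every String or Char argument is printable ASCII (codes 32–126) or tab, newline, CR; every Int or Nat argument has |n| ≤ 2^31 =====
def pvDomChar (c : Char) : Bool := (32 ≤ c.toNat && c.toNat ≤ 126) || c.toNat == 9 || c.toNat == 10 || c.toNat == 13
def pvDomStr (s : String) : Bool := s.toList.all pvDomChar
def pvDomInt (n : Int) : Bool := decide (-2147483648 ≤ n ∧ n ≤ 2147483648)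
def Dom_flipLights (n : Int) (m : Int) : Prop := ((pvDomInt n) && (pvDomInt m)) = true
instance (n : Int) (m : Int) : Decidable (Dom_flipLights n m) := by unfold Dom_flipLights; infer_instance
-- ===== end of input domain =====

-- B replaces A's breadth-first enumeration of up to 256 length-n candidate lists by a
-- closed-form case table over min(n,3) and min(m,4) (same return value, constant work).

-- ===== PORT A =====
def pvOp1 (lights : List Int) : List Int := lights.map (fun v => 1 - v)
def pvOp2 (lights : List Int) : List Int :=
  (PySem.List.enumerate lights).map (fun iv => if PySem.Int.mod iv.1 2 = 0 then iv.2 else 1 - iv.2)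
def pvOp3 (lights : List Int) : List Int :=
  (PySem.List.enumerate lights).map (fun iv => if PySem.Int.mod iv.1 2 = 1 then iv.2 else 1 - iv.2)
def pvOp4 (lights : List Int) : List Int :=
  (PySem.List.enumerate lights).map (fun iv => if PySem.Int.mod iv.1 3 = 0 then 1 - iv.2 else iv.2)

-- str(c) for a Python list of ints: "[a, b, …]" (hand port, exact for int lists)
def pvRepr (c : List Int) : String :=
  String.ofList ('[' :: PySem.Chars.join [',', ' '] (c.map PySem.Int.toChars) ++ [']'])

def flipLights (n : Int) (m : Int) : Int :=
  if m = 0 ∨ n = 0 then 1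
  else
    -- [1]*n is List.replicate n.toNat 1 (Python gives [] for n < 0)
    PySem.Set.len (PySem.Set.ofList
      (((PySem.List.pyRange 0 (min m 4)).foldl
          (fun candidate _ =>
            candidate.foldl (fun cur c => cur ++ [pvOp1 c, pvOp2 c, pvOp3 c, pvOp4 c]) [])
          [List.replicate n.toNat 1]).map pvRepr))

-- ===== PORT B =====
def flipLights_alt (n : Int) (m : Int) : Int :=
  if n ≤ 0 ∨ m ≤ 0 then 1
  else
    let k := min n 3
    if k = 1 then 2
    else if k = 2 then (if m = 1 then 3 else 4)
    else if m = 1 then 4 else if m = 2 then 7 else 8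

-- ===== PRECONDITION & SPEC =====
def Spec_flipLights (n : Int) (m : Int) (out : Int) : Prop := out = flipLights_alt n m
instance (n : Int) (m : Int) (out : Int) : Decidable (Spec_flipLights n m out) := by unfold Spec_flipLights; infer_instance

-- ===== CLAIM =====
def Claim_equal_flipLights : Prop := ∀ (n : Int) (m : Int), Dom_flipLights n m → Spec_flipLights n m (flipLights n m)

-- ===== LEMMAS AND PROOFS =====

-- Every reachable configuration is `pvMap n p` for a pattern p = (even-base, odd-base, flip-at-i%3=0).
def pvValB (p : Bool × Bool × Bool) (b2 b3 : Bool) : Int :=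
  if (cond b2 p.1 p.2.1).xor (b3 && p.2.2) then 1 else 0

def pvVal (p : Bool × Bool × Bool) (i : Nat) : Int :=
  pvValB p (decide (i % 2 = 0)) (decide (i % 3 = 0))

def pvMap (n : Int) (p : Bool × Bool × Bool) : List Int := (List.range n.toNat).map (pvVal p)

def pvS1 (p : Bool × Bool × Bool) : Bool × Bool × Bool := (!p.1, !p.2.1, p.2.2)
def pvS2 (p : Bool × Bool × Bool) : Bool × Bool × Bool := (p.1, !p.2.1, p.2.2)
def pvS3 (p : Bool × Bool × Bool) : Bool × Bool × Bool := (!p.1, p.2.1, p.2.2)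
def pvS4 (p : Bool × Bool × Bool) : Bool × Bool × Bool := (p.1, p.2.1, !p.2.2)

def pvSucc (ps : List (Bool × Bool × Bool)) : List (Bool × Bool × Bool) :=
  ps.flatMap (fun p => [pvS1 p, pvS2 p, pvS3 p, pvS4 p])

def pvIter : Nat → List (Bool × Bool × Bool)
  | 0 => [(true, true, false)]
  | k + 1 => pvSucc (pvIter k)

lemma pvValB01 : ∀ (p : Bool × Bool × Bool) (b2 b3 : Bool), pvValB p b2 b3 = 0 ∨ pvValB p b2 b3 = 1 := by
  decide

lemma pvVal01 (p : Bool × Bool × Bool) (i : Nat) : pvVal p i = 0 ∨ pvVal p i = 1 :=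
  pvValB01 p _ _

lemma pvV1B : ∀ (p : Bool × Bool × Bool) (b2 b3 : Bool),
    1 - pvValB p b2 b3 = pvValB (pvS1 p) b2 b3 := by decide

lemma pvV2B : ∀ (p : Bool × Bool × Bool) (b2 b3 : Bool),
    cond b2 (pvValB p b2 b3) (1 - pvValB p b2 b3) = pvValB (pvS2 p) b2 b3 := by decide

lemma pvV3B : ∀ (p : Bool × Bool × Bool) (b2 b3 : Bool),
    cond b2 (1 - pvValB p b2 b3) (pvValB p b2 b3) = pvValB (pvS3 p) b2 b3 := by decide

lemma pvV4B : ∀ (p : Bool × Bool × Bool) (b2 b3 : Bool),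
    cond b3 (1 - pvValB p b2 b3) (pvValB p b2 b3) = pvValB (pvS4 p) b2 b3 := by decide

lemma pvV1 (p : Bool × Bool × Bool) (i : Nat) : 1 - pvVal p i = pvVal (pvS1 p) i :=
  pvV1B p _ _

lemma pvV2 (p : Bool × Bool × Bool) (i : Nat) :
    (if i % 2 = 0 then pvVal p i else 1 - pvVal p i) = pvVal (pvS2 p) i := by
  rw [← Bool.cond_decide]
  exact pvV2B p _ _

lemma pvV3 (p : Bool × Bool × Bool) (i : Nat) :
    (if i % 2 = 1 then pvVal p i else 1 - pvVal p i) = pvVal (pvS3 p) i := by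
  rw [if_congr (show i % 2 = 1 ↔ ¬ i % 2 = 0 by omega) rfl rfl, ite_not, ← Bool.cond_decide]
  exact pvV3B p _ _

lemma pvV4 (p : Bool × Bool × Bool) (i : Nat) :
    (if i % 3 = 0 then 1 - pvVal p i else pvVal p i) = pvVal (pvS4 p) i := by
  rw [← Bool.cond_decide]
  exact pvV4B p _ _

lemma pvModNat (j d : Nat) : PySem.Int.mod ((j : Int)) (d : Int) = ((j % d : Nat) : Int) := by
  simp [PySem.Int.mod, Int.fmod_eq_emod]

lemma pvMod2 (j : Nat) : PySem.Int.mod ((j : Int)) 2 = ((j % 2 : Nat) : Int) := by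
  simpa using pvModNat j 2

lemma pvMod3 (j : Nat) : PySem.Int.mod ((j : Int)) 3 = ((j % 3 : Nat) : Int) := by
  simpa using pvModNat j 3

lemma pvBase (k : Nat) : (List.range k).map (pvVal (true, true, false)) = List.replicate k 1 := by
  rw [List.eq_replicate_iff]
  refine ⟨by simp, ?_⟩
  intro b hb
  obtain ⟨i, _, rfl⟩ := List.mem_map.1 hb
  exact (by decide : ∀ b2 b3, pvValB (true, true, false) b2 b3 = 1) _ _

lemma pvOp1_pvMap (n : Int) (p : Bool × Bool × Bool) : pvOp1 (pvMap n p) = pvMap n (pvS1 p) := by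
  unfold pvOp1 pvMap
  rw [List.map_map]
  exact List.map_congr_left fun i _ => pvV1 p i

lemma pvOp2_pvMap (n : Int) (p : Bool × Bool × Bool) : pvOp2 (pvMap n p) = pvMap n (pvS2 p) := by
  unfold pvOp2 pvMap
  apply List.ext_getElem
  · simp [PySem.List.length_enumerate]
  intro j h1 h2
  simp only [List.getElem_map, PySem.List.getElem_enumerate, List.getElem_range, zero_add]
  rw [pvMod2 j]
  simp only [Int.natCast_eq_zero]
  exact pvV2 p j

lemma pvOp3_pvMap (n : Int) (p : Bool × Bool × Bool) : pvOp3 (pvMap n p) = pvMap n (pvS3 p) := by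
  unfold pvOp3 pvMap
  apply List.ext_getElem
  · simp [PySem.List.length_enumerate]
  intro j h1 h2
  simp only [List.getElem_map, PySem.List.getElem_enumerate, List.getElem_range, zero_add]
  rw [pvMod2 j]
  simp only [Nat.cast_eq_one]
  exact pvV3 p j

lemma pvOp4_pvMap (n : Int) (p : Bool × Bool × Bool) : pvOp4 (pvMap n p) = pvMap n (pvS4 p) := by
  unfold pvOp4 pvMap
  apply List.ext_getElem
  · simp [PySem.List.length_enumerate]
  intro j h1 h2
  simp only [List.getElem_map, PySem.List.getElem_enumerate, List.getElem_range, zero_add]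
  rw [pvMod3 j]
  simp only [Int.natCast_eq_zero]
  exact pvV4 p j

lemma pvInner (n : Int) (ps : List (Bool × Bool × Bool)) :
    (ps.map (pvMap n)).foldl (fun cur c => cur ++ [pvOp1 c, pvOp2 c, pvOp3 c, pvOp4 c]) []
      = (pvSucc ps).map (pvMap n) := by
  rw [PySem.List.foldl_append_eq_flatMap (fun c => [pvOp1 c, pvOp2 c, pvOp3 c, pvOp4 c])]
  simp [pvSucc, List.flatMap_map, List.map_flatMap,
        pvOp1_pvMap, pvOp2_pvMap, pvOp3_pvMap, pvOp4_pvMap]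

lemma pvOuter (n : Int) (K : Nat) :
    (PySem.List.pyRange 0 (K : Int)).foldl
        (fun candidate _ =>
          candidate.foldl (fun cur c => cur ++ [pvOp1 c, pvOp2 c, pvOp3 c, pvOp4 c]) [])
        [List.replicate n.toNat 1]
      = (pvIter K).map (pvMap n) := by
  induction K with
  | zero =>
      rw [PySem.List.pyRange_one_eq_nil (by norm_num)]
      simp [pvIter, pvMap, pvBase]
  | succ k ih =>
      rw [show ((k + 1 : Nat) : Int) = (k : Int) + 1 by push_cast; ring,
          PySem.List.pyRange_one_succ_right (by positivity), List.foldl_append, ih]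
      simp only [List.foldl_cons, List.foldl_nil]
      rw [pvInner]
      rfl

-- cardinality toolkit
lemma pvSetLen {α : Type} [BEq α] [LawfulBEq α] [DecidableEq α] (l : List α) :
    PySem.Set.len (PySem.Set.ofList l) = (l.toFinset.card : Int) := by
  have h1 : (PySem.Set.ofList l).toFinset = l.toFinset := by
    apply Finset.ext
    intro x
    simp [List.mem_toFinset, PySem.Set.mem_ofList]
  have h2 := List.toFinset_card_of_nodup (PySem.Set.nodup_ofList (α := α) l)
  rw [h1] at h2
  simp [PySem.Set.len, ← h2]

lemma pvCardMap {α β : Type} [DecidableEq α] [DecidableEq β] (f : α → β) (l : List α)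
    (h : ∀ a ∈ l, ∀ b ∈ l, f a = f b → a = b) :
    (l.map f).toFinset.card = l.toFinset.card := by
  induction l with
  | nil => simp
  | cons a l ih =>
      have ih' := ih (fun x hx y hy => h x (by simp [hx]) y (by simp [hy]))
      by_cases ha : a ∈ l
      · have hfa : f a ∈ l.map f := List.mem_map.2 ⟨a, ha, rfl⟩
        simp [List.toFinset_cons, Finset.insert_eq_self.2 (List.mem_toFinset.2 hfa),
              Finset.insert_eq_self.2 (List.mem_toFinset.2 ha), ih']
      · have hfa : f a ∉ l.map f := by
          intro hmem
          obtain ⟨b, hb, hfb⟩ := List.mem_map.1 hmem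
          exact ha (h b (by simp [hb]) a (by simp) hfb ▸ hb)
        rw [List.map_cons, List.toFinset_cons, List.toFinset_cons,
            Finset.card_insert_of_notMem (by simpa using hfa),
            Finset.card_insert_of_notMem (by simpa using ha), ih']

lemma pvJoinInj (xs : List Int) : ∀ (ys : List Int),
    (∀ a ∈ xs, a = 0 ∨ a = 1) → (∀ a ∈ ys, a = 0 ∨ a = 1) →
    xs.length = ys.length →
    PySem.Chars.join [',', ' '] (xs.map PySem.Int.toChars)
      = PySem.Chars.join [',', ' '] (ys.map PySem.Int.toChars) → xs = ys := by
  induction xs with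
  | nil =>
      intro ys _ _ hlen _
      cases ys with
      | nil => rfl
      | cons b ys => simp at hlen
  | cons a xs ih =>
      intro ys hx hy hlen h
      cases ys with
      | nil => simp at hlen
      | cons b ys =>
          cases xs with
          | nil =>
              cases ys with
              | cons c cs => simp at hlen
              | nil =>
                  simp only [List.map_cons, List.map_nil, PySem.Chars.join_singleton] at h
                  rcases hx a (by simp) with rfl | rfl <;> rcases hy b (by simp) with rfl | rfl <;>
                    first | rfl | (revert h; decide)
          | cons a' xs' =>
              cases ys with
              | nil => simp at hlen
              | cons b' ys' =>
                  simp only [List.map_cons, PySem.Chars.join_cons_cons] at h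
                  have hab : a = b ∧
                      PySem.Chars.join [',', ' '] ((a' :: xs').map PySem.Int.toChars)
                        = PySem.Chars.join [',', ' '] ((b' :: ys').map PySem.Int.toChars) := by
                    rcases hx a (by simp) with rfl | rfl <;> rcases hy b (by simp) with rfl | rfl <;>
                      simp only [show PySem.Int.toChars 0 = ['0'] from rfl,
                        show PySem.Int.toChars 1 = ['1'] from rfl, List.cons_append, List.nil_append, List.cons.injEq] at h <;>
                      simp_all
                  obtain ⟨rfl, htail⟩ := hab
                  have := ih (b' :: ys') (fun x hm => hx x (List.mem_cons_of_mem _ hm))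
                    (fun x hm => hy x (List.mem_cons_of_mem _ hm)) (by simpa using hlen) htail
                  rw [this]

lemma pvReprInj (xs ys : List Int)
    (hx : ∀ a ∈ xs, a = 0 ∨ a = 1) (hy : ∀ a ∈ ys, a = 0 ∨ a = 1)
    (hlen : xs.length = ys.length) (h : pvRepr xs = pvRepr ys) : xs = ys := by
  unfold pvRepr at h
  have h' := congrArg String.toList h
  simp only [String.toList_ofList, List.cons.injEq, List.append_left_inj] at h'
  exact pvJoinInj xs ys hx hy hlen h'.2

lemma pvTriple : ∀ p q : Bool × Bool × Bool,
    pvValB p true true = pvValB q true true →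
    pvValB p false false = pvValB q false false →
    pvValB p true false = pvValB q true false → p = q := by decide

lemma pvMapInj (n : Int) (hn : 3 ≤ n) (p q : Bool × Bool × Bool)
    (h : pvMap n p = pvMap n q) : p = q := by
  have hval : ∀ i : Nat, i < n.toNat → pvVal p i = pvVal q i := by
    intro i hi
    have := congrArg (fun l => l[i]?) h
    simpa [pvMap, List.getElem?_map, List.getElem?_range, hi] using this
  exact pvTriple p q (hval 0 (by omega)) (hval 1 (by omega)) (hval 2 (by omega))

lemma pvCardRepr (n : Int) (k : Nat) :
    (((pvIter k).map (fun p => pvRepr (pvMap n p))).toFinset.card : Int)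
      = (((pvIter k).map (pvMap n)).toFinset.card : Int) := by
  have hsplit : (pvIter k).map (fun p => pvRepr (pvMap n p))
      = ((pvIter k).map (pvMap n)).map pvRepr := by simp [List.map_map]
  rw [hsplit]
  norm_cast
  apply pvCardMap
  intro a ha b hb hab
  obtain ⟨p, _, rfl⟩ := List.mem_map.1 ha
  obtain ⟨q, _, rfl⟩ := List.mem_map.1 hb
  refine pvReprInj _ _ ?_ ?_ (by simp [pvMap]) hab
  · intro x hxm; obtain ⟨i, _, rfl⟩ := List.mem_map.1 hxm; exact pvVal01 p i
  · intro x hxm; obtain ⟨i, _, rfl⟩ := List.mem_map.1 hxm; exact pvVal01 q i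

lemma pvCardBig (n : Int) (hn : 3 ≤ n) (k : Nat) :
    (((pvIter k).map (pvMap n)).toFinset.card : Int) = ((pvIter k).toFinset.card : Int) := by
  norm_cast
  exact pvCardMap _ _ (fun a _ b _ hab => pvMapInj n hn a b hab)

lemma pvIter_ne_nil (k : Nat) : pvIter k ≠ [] := by
  induction k with
  | zero => simp [pvIter]
  | succ k ih =>
      cases hk : pvIter k with
      | nil => exact absurd hk ih
      | cons p ps => simp [pvIter, pvSucc, hk]

lemma pvCardNeg (n : Int) (hn : n < 0) (k : Nat) :
    (((pvIter k).map (pvMap n)).toFinset.card : Int) = 1 := by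
  have hmap : (pvIter k).map (pvMap n) = (pvIter k).map (fun _ => []) := by
    apply List.map_congr_left
    intro p _
    simp [pvMap, show n.toNat = 0 by omega]
  rw [hmap]
  have hfin : ((pvIter k).map (fun _ => ([] : List Int))).toFinset = {[]} := by
    apply Finset.ext
    intro x
    cases hk : pvIter k with
    | nil => exact absurd hk (pvIter_ne_nil k)
    | cons p ps => simp [hk]
  rw [hfin]
  simp

lemma pvAcount (n : Int) (m : Int) (hm : 1 ≤ m) (hn : n ≠ 0) :
    flipLights n m
      = (((pvIter (min m 4).toNat).map (fun p => pvRepr (pvMap n p))).toFinset.card : Int) := by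
  unfold flipLights
  rw [if_neg (show ¬(m = 0 ∨ n = 0) by omega)]
  rw [show PySem.List.pyRange 0 (min m 4) = PySem.List.pyRange 0 (((min m 4).toNat : Nat) : Int) by
        rw [Int.toNat_of_nonneg (by omega)]]
  rw [pvOuter n, List.map_map, pvSetLen]
  rfl

lemma pvAltNeg (n m : Int) (hn : n < 0) : flipLights_alt n m = 1 := by
  unfold flipLights_alt
  rw [if_pos (Or.inl (by omega))]

lemma pvAlt1 (m : Int) (hm : 1 ≤ m) : flipLights_alt 1 m = 2 := by
  unfold flipLights_alt
  rw [if_neg (show ¬((1 : Int) ≤ 0 ∨ m ≤ 0) by omega)]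
  norm_num

lemma pvAlt2 (m : Int) (hm : 1 ≤ m) : flipLights_alt 2 m = if m = 1 then 3 else 4 := by
  unfold flipLights_alt
  rw [if_neg (show ¬((2 : Int) ≤ 0 ∨ m ≤ 0) by omega)]
  norm_num

lemma pvAltBig (n : Int) (m : Int) (hn : 3 ≤ n) (hm : 1 ≤ m) :
    flipLights_alt n m = if m = 1 then 4 else if m = 2 then 7 else 8 := by
  unfold flipLights_alt
  rw [if_neg (show ¬(n ≤ 0 ∨ m ≤ 0) by omega)]
  simp only [show min n 3 = 3 by omega]
  norm_num

-- ===== VERDICT =====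
set_option maxRecDepth 100000 in
theorem flipLights_spec : Claim_equal_flipLights := by
  intro n m _
  unfold Spec_flipLights
  by_cases hm0 : m = 0
  · subst hm0
    unfold flipLights flipLights_alt
    simp
  by_cases hn0 : n = 0
  · subst hn0
    unfold flipLights flipLights_alt
    simp
  by_cases hmneg : m < 0
  · unfold flipLights flipLights_alt
    rw [if_neg (show ¬(m = 0 ∨ n = 0) by omega), if_pos (show n ≤ 0 ∨ m ≤ 0 from Or.inr (by omega))]
    rw [PySem.List.pyRange_one_eq_nil (show min m 4 ≤ 0 by omega)]
    simp only [List.foldl_nil, List.map_cons, List.map_nil]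
    rw [pvSetLen]
    simp
  have hm : 1 ≤ m := by omega
  rw [pvAcount n m hm hn0, pvCardRepr]
  by_cases hnneg : n < 0
  · rw [pvCardNeg n hnneg, pvAltNeg n m hnneg]
  by_cases hn1 : n = 1
  · subst hn1
    rw [pvAlt1 m hm]
    rcases (show m = 1 ∨ m = 2 ∨ m = 3 ∨ 4 ≤ m by omega) with rfl | rfl | rfl | h4
    · decide
    · decide
    · decide
    · rw [show min m 4 = 4 by omega]; decide
  by_cases hn2 : n = 2
  · subst hn2
    rw [pvAlt2 m hm]
    rcases (show m = 1 ∨ m = 2 ∨ m = 3 ∨ 4 ≤ m by omega) with rfl | rfl | rfl | h4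
    · decide
    · decide
    · decide
    · rw [if_neg (show ¬(m = 1) by omega), show min m 4 = 4 by omega]; decide
  have hn3 : 3 ≤ n := by omega
  rw [pvCardBig n hn3, pvAltBig n m hn3 hm]
  rcases (show m = 1 ∨ m = 2 ∨ m = 3 ∨ 4 ≤ m by omega) with rfl | rfl | rfl | h4
  · decide
  · decide
  · decide
  · rw [if_neg (show ¬(m = 1) by omega), if_neg (show ¬(m = 2) by omega),
        show min m 4 = 4 by omega]
    decide
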